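-- pv_equiv track=rewrite | github.com/kianwoon/jarvis | fix_via_api.py | classify_entity_type
-- ===== SOURCE A (Python) =====
-- def classify_entity_type(entity_name: str) -> str:
--     """Classify entity type based on name patterns"""
--     if not entity_name:
--         return 'CONCEPT'
--
--     name_lower = entity_name.lower()
--
--     # Organization patterns
--     if any(org_term in name_lower for org_term in [
--         'bank', 'corp', 'corporation', 'company', 'inc', 'ltd', 'group',
--         'authority', 'ministry', 'government', 'agency', 'foundation'
--     ]):
--         return 'ORGANIZATION'
--
--     # Technology patterns
--     if any(tech_term in name_lower for tech_term in [
--         'database', 'db', 'sql', 'stack', 'base', 'cloud', 'platform',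
--         'system', 'framework', 'api', 'service', 'software', 'app', 'mainframe'
--     ]):
--         return 'TECHNOLOGY'
--
--     # Location patterns
--     if any(loc_term in name_lower for loc_term in [
--         'singapore', 'hong kong', 'china', 'india', 'indonesia', 'thailand',
--         'vietnam', 'malaysia', 'philippines', 'korea', 'japan', 'country',
--         'city', 'region', 'state', 'province'
--     ]):
--         return 'LOCATION'
--
--     # Product/Service patterns
--     if any(prod_term in name_lower for prod_term in [
--         'pay', 'payment', 'wallet', 'trial', 'poc', 'proof-of-concept',
--         'solution', 'offering', 'product'
--     ]):
--         return 'PRODUCT'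
--
--     # Project patterns
--     if any(proj_term in name_lower for proj_term in [
--         'project', 'initiative', 'program', 'transformation', 'migration',
--         'implementation', 'deployment', 'rollout', '2.0'
--     ]):
--         return 'PROJECT'
--
--     # Event patterns
--     if any(event_term in name_lower for event_term in [
--         'conference', 'meeting', 'summit', 'workshop', 'training',
--         'launch', 'release', 'announcement'
--     ]):
--         return 'EVENT'
--
--     # Default to CONCEPT for abstract ideas
--     return 'CONCEPT'
-- ===== SOURCE B (Python) =====
-- _ORG = ['bank', 'corp', 'corporation', 'company', 'inc', 'ltd', 'group',
--         'authority', 'ministry', 'government', 'agency', 'foundation']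
-- _TECH = ['database', 'db', 'sql', 'stack', 'base', 'cloud', 'platform',
--          'system', 'framework', 'api', 'service', 'software', 'app', 'mainframe']
-- _LOC = ['singapore', 'hong kong', 'china', 'india', 'indonesia', 'thailand',
--         'vietnam', 'malaysia', 'philippines', 'korea', 'japan', 'country',
--         'city', 'region', 'state', 'province']
-- _PROD = ['pay', 'payment', 'wallet', 'trial', 'poc', 'proof-of-concept',
--          'solution', 'offering', 'product']
-- _PROJ = ['project', 'initiative', 'program', 'transformation', 'migration',
--          'implementation', 'deployment', 'rollout', '2.0']
-- _EVENT = ['conference', 'meeting', 'summit', 'workshop', 'training',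
--           'launch', 'release', 'announcement']
--
-- # One flat list of (term, rank); the category is recovered from the minimal rank matched.
-- _RANKED = ([(t, 0) for t in _ORG] + [(t, 1) for t in _TECH] + [(t, 2) for t in _LOC]
--            + [(t, 3) for t in _PROD] + [(t, 4) for t in _PROJ] + [(t, 5) for t in _EVENT])
-- _CATS = ['ORGANIZATION', 'TECHNOLOGY', 'LOCATION', 'PRODUCT', 'PROJECT', 'EVENT', 'CONCEPT']
--
-- def classify_entity_type(entity_name: str) -> str:
--     """Single pass over one flat (term, rank) list keeping the minimum matched rank."""
--     if not entity_name:
--         return 'CONCEPT'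
--     name_lower = entity_name.lower()
--     best = 6
--     for term, rank in _RANKED:
--         if rank < best and term in name_lower:
--             best = rank
--     return _CATS[best]
-- ===== Notes on version B (the rewrite author's own statement) =====
-- stated objective: alternative
-- what changed: Replaced the six sequential early-return category checks with a single fold over one flat (term, rank) list that keeps the minimum matched rank and indexes a category table at the end.
import Mathlib
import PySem

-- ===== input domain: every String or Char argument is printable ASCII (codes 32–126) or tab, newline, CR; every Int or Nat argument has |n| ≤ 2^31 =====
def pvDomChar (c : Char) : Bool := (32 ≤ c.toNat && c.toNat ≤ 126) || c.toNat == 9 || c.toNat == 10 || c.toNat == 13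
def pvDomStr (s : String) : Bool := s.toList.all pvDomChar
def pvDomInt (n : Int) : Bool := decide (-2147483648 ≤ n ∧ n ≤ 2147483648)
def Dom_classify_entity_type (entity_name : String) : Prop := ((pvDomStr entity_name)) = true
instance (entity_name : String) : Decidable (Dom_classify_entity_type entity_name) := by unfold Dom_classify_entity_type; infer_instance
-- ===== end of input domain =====

-- B replaces A's six sequential if-any category checks by a single fold over one flat (term, rank) list keeping the minimum matched rank; same cost, different decomposition.


-- ===== PORT A =====
def classify_entity_type (entity_name : String) : String :=
  if PySem.Str.len entity_name == 0 then "CONCEPT"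
  else
    let name_lower := PySem.Str.lower entity_name
    if (["bank", "corp", "corporation", "company", "inc", "ltd", "group",
         "authority", "ministry", "government", "agency", "foundation"].any
          (fun org_term => PySem.Str.isIn org_term name_lower)) then "ORGANIZATION"
    else if (["database", "db", "sql", "stack", "base", "cloud", "platform",
              "system", "framework", "api", "service", "software", "app", "mainframe"].any
          (fun tech_term => PySem.Str.isIn tech_term name_lower)) then "TECHNOLOGY"
    else if (["singapore", "hong kong", "china", "india", "indonesia", "thailand",
              "vietnam", "malaysia", "philippines", "korea", "japan", "country",
              "city", "region", "state", "province"].any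
          (fun loc_term => PySem.Str.isIn loc_term name_lower)) then "LOCATION"
    else if (["pay", "payment", "wallet", "trial", "poc", "proof-of-concept",
              "solution", "offering", "product"].any
          (fun prod_term => PySem.Str.isIn prod_term name_lower)) then "PRODUCT"
    else if (["project", "initiative", "program", "transformation", "migration",
              "implementation", "deployment", "rollout", "2.0"].any
          (fun proj_term => PySem.Str.isIn proj_term name_lower)) then "PROJECT"
    else if (["conference", "meeting", "summit", "workshop", "training",
              "launch", "release", "announcement"].any
          (fun event_term => PySem.Str.isIn event_term name_lower)) then "EVENT"
    else "CONCEPT"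

-- ===== PORT B =====
-- B-side helpers: the six term lists, the flat ranked list, and the category table
def patsORG : List String :=
  ["bank", "corp", "corporation", "company", "inc", "ltd", "group",
   "authority", "ministry", "government", "agency", "foundation"]
def patsTECH : List String :=
  ["database", "db", "sql", "stack", "base", "cloud", "platform",
   "system", "framework", "api", "service", "software", "app", "mainframe"]
def patsLOC : List String :=
  ["singapore", "hong kong", "china", "india", "indonesia", "thailand",
   "vietnam", "malaysia", "philippines", "korea", "japan", "country",
   "city", "region", "state", "province"]
def patsPROD : List String :=
  ["pay", "payment", "wallet", "trial", "poc", "proof-of-concept",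
   "solution", "offering", "product"]
def patsPROJ : List String :=
  ["project", "initiative", "program", "transformation", "migration",
   "implementation", "deployment", "rollout", "2.0"]
def patsEVENT : List String :=
  ["conference", "meeting", "summit", "workshop", "training",
   "launch", "release", "announcement"]

def rankedPatterns : List (String × Nat) :=
  patsORG.map (fun t => (t, 0)) ++ patsTECH.map (fun t => (t, 1))
    ++ patsLOC.map (fun t => (t, 2)) ++ patsPROD.map (fun t => (t, 3))
    ++ patsPROJ.map (fun t => (t, 4)) ++ patsEVENT.map (fun t => (t, 5))

def catsTable : List String :=
  ["ORGANIZATION", "TECHNOLOGY", "LOCATION", "PRODUCT", "PROJECT", "EVENT", "CONCEPT"]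

def classify_entity_type_alt (entity_name : String) : String :=
  if PySem.Str.len entity_name == 0 then "CONCEPT"
  else
    let name_lower := PySem.Str.lower entity_name
    let best := rankedPatterns.foldl
      (fun best p => if p.2 < best ∧ PySem.Str.isIn p.1 name_lower = true then p.2 else best) 6
    catsTable.getD best "CONCEPT"

-- ===== PRECONDITION & SPEC =====
def Spec_classify_entity_type (entity_name : String) (out : String) : Prop := out = classify_entity_type_alt entity_name
instance (entity_name : String) (out : String) : Decidable (Spec_classify_entity_type entity_name out) := by unfold Spec_classify_entity_type; infer_instance

-- ===== CLAIM (what is proved, stated in full; the proofs are below) =====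
def Claim_equal_classify_entity_type : Prop := ∀ (entity_name : String), Dom_classify_entity_type entity_name → Spec_classify_entity_type entity_name (classify_entity_type entity_name)

-- ===== LEMMAS AND PROOFS =====

-- Folding one category block of rank cr over accumulator r updates r to cr iff cr < r and some term matches.
theorem block_fold (nl : String) (tms : List String) (cr r : Nat) :
    (tms.map (fun t => (t, cr))).foldl
      (fun best p => if p.2 < best ∧ PySem.Str.isIn p.1 nl = true then p.2 else best) r
      = if cr < r ∧ tms.any (fun t => PySem.Str.isIn t nl) = true then cr else r := by
  induction tms generalizing r with
  | nil => simp
  | cons t ts ih =>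
    simp only [List.map_cons, List.foldl_cons, List.any_cons, Bool.or_eq_true]
    rw [ih]
    split_ifs <;> first
      | rfl
      | (exfalso; omega)
      | (exfalso; tauto)

-- ===== VERDICT (by name: the statement is the Claim_ definition above) =====
theorem classify_entity_type_spec : Claim_equal_classify_entity_type := by
  intro s _
  unfold Spec_classify_entity_type classify_entity_type classify_entity_type_alt
  by_cases he : (PySem.Str.len s == 0) = true
  · rw [if_pos he, if_pos he]
  · rw [if_neg he, if_neg he]
    simp only [rankedPatterns, List.foldl_append, block_fold,
      patsORG, patsTECH, patsLOC, patsPROD, patsPROJ, patsEVENT, catsTable]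
    generalize (List.any ["conference", "meeting", "summit", "workshop", "training",
      "launch", "release", "announcement"] (fun t => PySem.Str.isIn t (PySem.Str.lower s))) = a6
    generalize (List.any ["project", "initiative", "program", "transformation", "migration",
      "implementation", "deployment", "rollout", "2.0"] (fun t => PySem.Str.isIn t (PySem.Str.lower s))) = a5
    generalize (List.any ["pay", "payment", "wallet", "trial", "poc", "proof-of-concept",
      "solution", "offering", "product"] (fun t => PySem.Str.isIn t (PySem.Str.lower s))) = a4
    generalize (List.any ["singapore", "hong kong", "china", "india", "indonesia", "thailand",
      "vietnam", "malaysia", "philippines", "korea", "japan", "country",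
      "city", "region", "state", "province"] (fun t => PySem.Str.isIn t (PySem.Str.lower s))) = a3
    generalize (List.any ["database", "db", "sql", "stack", "base", "cloud", "platform",
      "system", "framework", "api", "service", "software", "app", "mainframe"] (fun t => PySem.Str.isIn t (PySem.Str.lower s))) = a2
    generalize (List.any ["bank", "corp", "corporation", "company", "inc", "ltd", "group",
      "authority", "ministry", "government", "agency", "foundation"] (fun t => PySem.Str.isIn t (PySem.Str.lower s))) = a1
    cases a1 <;> cases a2 <;> cases a3 <;> cases a4 <;> cases a5 <;> cases a6 <;> rfl
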